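-- pv_equiv track=rewrite | github.com/vita-epfl/monoloco | monoloco/prep/preprocess_nu_stereo.py | token_matching
-- ===== SOURCE A (Python) =====
-- def token_matching(token, tokens_r):
--     """match annotations based on their tokens"""
--     s_matches = []
--     for idx_r, token_r in enumerate(tokens_r):
--         if token == token_r:
--             s_matches.append((idx_r, 1))
--         elif len(s_matches) < 2:
--             s_matches.append((idx_r, 0))
--     return s_matches
-- ===== SOURCE B (Python) =====
-- def token_matching(token, tokens_r):
--     """match annotations based on their tokens"""
--     head = [(i, 1 if token == t else 0) for i, t in enumerate(tokens_r[:2])]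
--     tail = [(i, 1) for i, t in enumerate(tokens_r) if i >= 2 and token == t]
--     return head + tail
-- ===== Notes on version B (the rewrite author's own statement) =====
-- stated objective: alternative
-- what changed: Replaces A's single stateful pass (branch on the running accumulator length) by two stateless comprehensions: a head over the first two tokens recording 0/1 matches, plus a match-only comprehension over indices >= 2, exploiting the invariant that the accumulator has length >= 2 from index 2 on.
import Mathlib
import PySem

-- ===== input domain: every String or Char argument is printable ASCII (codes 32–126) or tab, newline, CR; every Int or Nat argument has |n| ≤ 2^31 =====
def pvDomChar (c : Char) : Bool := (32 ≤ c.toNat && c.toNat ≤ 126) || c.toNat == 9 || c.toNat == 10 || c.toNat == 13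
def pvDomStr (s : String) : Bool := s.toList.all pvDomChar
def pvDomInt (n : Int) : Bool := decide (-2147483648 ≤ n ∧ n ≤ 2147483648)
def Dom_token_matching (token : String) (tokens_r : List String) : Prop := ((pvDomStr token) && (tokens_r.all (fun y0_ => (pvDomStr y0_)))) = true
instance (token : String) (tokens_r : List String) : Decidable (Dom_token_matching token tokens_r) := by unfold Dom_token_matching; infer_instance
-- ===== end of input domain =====

-- B replaces A's stateful accumulator-length branch by two stateless comprehensions
-- (head over the first two tokens, match-only tail over indices ≥ 2); same cost, different decomposition.

-- ===== PORT A =====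
def token_matching (token : String) (tokens_r : List String) : List (Int × Int) :=
  (PySem.List.enumerate tokens_r 0).foldl
    (fun s_matches p =>
      if token == p.2 then s_matches ++ [(p.1, (1 : Int))]
      else if s_matches.length < 2 then s_matches ++ [(p.1, (0 : Int))]
      else s_matches) []

-- ===== PORT B =====
def token_matching_alt (token : String) (tokens_r : List String) : List (Int × Int) :=
  (PySem.List.enumerate (PySem.List.slice tokens_r none (some 2)) 0).map
    (fun p => (p.1, if token == p.2 then (1 : Int) else 0))
  ++ (PySem.List.enumerate tokens_r 0).filterMap
    (fun p => if 2 ≤ p.1 ∧ token == p.2 then some (p.1, (1 : Int)) else none)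

-- ===== PRECONDITION & SPEC =====
def Spec_token_matching (token : String) (tokens_r : List String) (out : List (Int × Int)) : Prop := out = token_matching_alt token tokens_r
instance (token : String) (tokens_r : List String) (out : List (Int × Int)) : Decidable (Spec_token_matching token tokens_r out) := by unfold Spec_token_matching; infer_instance

-- ===== CLAIM (what is proved, stated in full; the proofs are below) =====
def Claim_equal_token_matching : Prop := ∀ (token : String) (tokens_r : List String), Dom_token_matching token tokens_r → Spec_token_matching token tokens_r (token_matching token tokens_r)

-- ===== LEMMAS AND PROOFS =====

-- A's tail phase: once the accumulator has length ≥ 2, only the match branch fires.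
theorem tm_foldl_tail (token : String) (l : List String) (s : Int) (acc : List (Int × Int))
    (h : 2 ≤ acc.length) :
    (PySem.List.enumerate l s).foldl
      (fun s_matches p =>
        if token == p.2 then s_matches ++ [(p.1, (1 : Int))]
        else if s_matches.length < 2 then s_matches ++ [(p.1, (0 : Int))]
        else s_matches) acc
    = acc ++ (PySem.List.enumerate l s).filterMap
        (fun p => if token == p.2 then some (p.1, (1 : Int)) else none) := by
  induction l generalizing s acc with
  | nil => simp [PySem.List.enumerate_nil]
  | cons t l ih =>
    rw [PySem.List.enumerate_cons]
    by_cases hm : (token == t) = true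
    · simp only [List.foldl_cons, List.filterMap_cons]
      rw [if_pos hm, if_pos hm]
      rw [ih (s + 1) _ (by simp; omega)]
      simp
    · have hl : ¬ acc.length < 2 := by omega
      simp only [List.foldl_cons, List.filterMap_cons]
      rw [if_neg hm, if_neg hl, if_neg hm]
      rw [ih (s + 1) _ h]

-- B's tail filter with all indices ≥ 2 is the plain match filter.
theorem tm_filter_tail (token : String) (l : List String) (s : Int) (h : 2 ≤ s) :
    (PySem.List.enumerate l s).filterMap
      (fun p => if 2 ≤ p.1 ∧ token == p.2 then some (p.1, (1 : Int)) else none)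
    = (PySem.List.enumerate l s).filterMap
        (fun p => if token == p.2 then some (p.1, (1 : Int)) else none) := by
  induction l generalizing s with
  | nil => simp [PySem.List.enumerate_nil]
  | cons t l ih =>
    rw [PySem.List.enumerate_cons]
    by_cases hm : token = t
    · subst hm
      simp [h]
      simpa using ih (s + 1) (by omega)
    · simp [hm]
      simpa using ih (s + 1) (by omega)

-- ===== VERDICT (by name: the statement is the Claim_ definition above) =====
theorem token_matching_spec : Claim_equal_token_matching := by
  intro token tokens_r _
  unfold Spec_token_matching token_matching token_matching_alt
  match tokens_r with
  | [] => simp [PySem.List.enumerate_nil, PySem.List.slice]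
  | [t0] =>
    rw [PySem.List.slice_to _ (by norm_num)]
    by_cases h0 : token = t0 <;>
      simp [PySem.List.enumerate_cons, PySem.List.enumerate_nil, h0]
  | t0 :: t1 :: rest =>
    rw [PySem.List.slice_to _ (by norm_num)]
    simp only [show ((2 : Int).toNat) = 2 from rfl, List.take_succ_cons, List.take_zero,
      PySem.List.enumerate_cons, PySem.List.enumerate_nil, List.foldl_cons,
      List.map_cons, List.map_nil, List.filterMap_cons]
    rw [tm_filter_tail token rest (0 + 1 + 1) (by norm_num)]
    rw [tm_foldl_tail token rest _ _ (by split_ifs <;> simp_all)]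
    by_cases h0 : token = t0
    · subst h0
      by_cases h1 : token = t1 <;> simp [h1]
    · by_cases h1 : token = t1
      · subst h1
        simp [h0]
      · simp [h0, h1]
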